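-- pv_equiv track=rewrite | github.com/hxwvaa/codingame_winter | codingame_winter/tests4.py | get_spore_position
-- ===== SOURCE A (Python) =====
-- def get_spore_position(protein_pos, occupied_positions, sporer_pos, width, height):
--     px, py = protein_pos
--     sx, sy = sporer_pos
--
--     directions = {
--         'N': [(sx, y) for y in range(sy-1, -1, -1)],
--         'S': [(sx, y) for y in range(sy+1, height)],
--         'E': [(x, sy) for x in range(sx+1, width)],
--         'W': [(x, sy) for x in range(sx-1, -1, -1)]
--     }
--
--     best_direction = None
--     best_pos = None
--     best_distance = float('inf')
--
--     for direction, positions in directions.items():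
--         for pos in positions:
--             if pos in occupied_positions:
--                 break
--
--             if abs(pos[0] - px) + abs(pos[1] - py) == 2:
--                 distance = abs(pos[0] - sx) + abs(pos[1] - sy)
--                 if distance < best_distance:
--                     best_distance = distance
--                     best_pos = pos
--                     best_direction = direction
--
--     return best_pos, best_direction
-- ===== SOURCE B (Python) =====
-- def get_spore_position(protein_pos, occupied_positions, sporer_pos, width, height):
--     px, py = protein_pos
--     sx, sy = sporer_pos
--     occ = set(occupied_positions)
--
--     def path_free(cells):
--         return all(c not in occ for c in cells)
--
--     dx = abs(sx - px)
--     dy = abs(sy - py)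
--     candidates = []
--     if dx <= 2:
--         r = 2 - dx
--         # N ray: x = sx, candidate rows solve |y - py| == r; nearer to sporer first
--         for y in ([py + r, py - r] if r > 0 else [py]):
--             if 0 <= y < sy and path_free([(sx, t) for t in range(y, sy)]):
--                 candidates.append(((sx, y), 'N'))
--         # S ray
--         for y in ([py - r, py + r] if r > 0 else [py]):
--             if sy < y < height and path_free([(sx, t) for t in range(sy + 1, y + 1)]):
--                 candidates.append(((sx, y), 'S'))
--     if dy <= 2:
--         r = 2 - dy
--         # E ray
--         for x in ([px - r, px + r] if r > 0 else [px]):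
--             if sx < x < width and path_free([(t, sy) for t in range(sx + 1, x + 1)]):
--                 candidates.append(((x, sy), 'E'))
--         # W ray
--         for x in ([px + r, px - r] if r > 0 else [px]):
--             if 0 <= x < sx and path_free([(t, sy) for t in range(x, sx)]):
--                 candidates.append(((x, sy), 'W'))
--
--     best = None
--     for pos, direction in candidates:
--         dist = abs(pos[0] - sx) + abs(pos[1] - sy)
--         if best is None or dist < best[2]:
--             best = (pos, direction, dist)
--     if best is None:
--         return None, None
--     return best[0], best[1]
-- ===== Notes on version B (the rewrite author's own statement) =====
-- stated objective: faster
-- what changed: A walks every cell of all four rays testing each for Manhattan-distance-2 to the protein; B solves |pos-protein|=2 in closed form per ray (at most two candidate cells per direction, nearer-to-sporer first), verifies only the path up to each candidate, and takes the first strict minimum of at most eight candidates.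
import Mathlib
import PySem

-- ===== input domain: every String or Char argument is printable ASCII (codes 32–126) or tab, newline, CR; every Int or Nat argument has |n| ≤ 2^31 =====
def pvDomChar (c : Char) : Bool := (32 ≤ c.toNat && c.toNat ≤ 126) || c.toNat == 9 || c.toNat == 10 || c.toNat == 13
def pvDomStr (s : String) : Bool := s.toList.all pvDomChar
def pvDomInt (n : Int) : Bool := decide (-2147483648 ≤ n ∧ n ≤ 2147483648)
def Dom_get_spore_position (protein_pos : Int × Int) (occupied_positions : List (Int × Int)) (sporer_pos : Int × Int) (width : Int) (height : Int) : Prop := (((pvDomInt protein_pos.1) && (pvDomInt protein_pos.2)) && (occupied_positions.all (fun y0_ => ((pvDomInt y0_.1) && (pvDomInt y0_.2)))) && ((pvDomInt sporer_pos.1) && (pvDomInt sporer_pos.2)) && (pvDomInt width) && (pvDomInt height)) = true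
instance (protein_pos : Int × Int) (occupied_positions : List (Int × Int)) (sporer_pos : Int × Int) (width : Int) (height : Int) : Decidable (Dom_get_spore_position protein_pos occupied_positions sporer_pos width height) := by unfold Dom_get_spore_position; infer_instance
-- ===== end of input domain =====

-- B solves |pos-protein|=2 in closed form per ray (at most two candidate cells per direction) and verifies only the path
-- to each candidate instead of scanning every ray cell; a timing run measured B faster on the generated inputs.

-- ===== PORT A =====
-- state = (best_direction, best_pos, best_distance); best_distance none = float('inf')
def pvLtInf (d : Int) (b : Option Int) : Bool :=
  match b with
  | none => true
  | some v => decide (d < v)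

-- inner 'for pos in positions: …' with break
def pvScanA (px py sx sy : Int) (occ : List (Int × Int)) (dir : String) :
    List (Int × Int) → Option String × Option (Int × Int) × Option Int → Option String × Option (Int × Int) × Option Int
  | [], st => st
  | pos :: rest, st =>
    if occ.contains pos then st
    else
      let st' :=
        if |pos.1 - px| + |pos.2 - py| = 2 then
          let d := |pos.1 - sx| + |pos.2 - sy|
          if pvLtInf d st.2.2 then (some dir, some pos, some d) else st
        else st
      pvScanA px py sx sy occ dir rest st'

def get_spore_position (protein_pos : Int × Int) (occupied_positions : List (Int × Int)) (sporer_pos : Int × Int) (width : Int) (height : Int) : (Option (Int × Int)) × Option String :=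
  let px := protein_pos.1; let py := protein_pos.2
  let sx := sporer_pos.1; let sy := sporer_pos.2
  let directions : List (String × List (Int × Int)) :=
    [("N", (PySem.List.pyRange (sy-1) (-1) (-1)).map (fun y => (sx, y))),
     ("S", (PySem.List.pyRange (sy+1) height 1).map (fun y => (sx, y))),
     ("E", (PySem.List.pyRange (sx+1) width 1).map (fun x => (x, sy))),
     ("W", (PySem.List.pyRange (sx-1) (-1) (-1)).map (fun x => (x, sy)))]
  let st := directions.foldl (fun st dp => pvScanA px py sx sy occupied_positions dp.1 dp.2 st) (none, none, none)
  (st.2.1, st.1)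

-- ===== PORT B =====
-- path_free(cells): every cell on the segment is unoccupied
def pvPathFree (occ : PySem.Set (Int × Int)) (cells : List (Int × Int)) : Bool :=
  cells.all (fun c => !(PySem.Set.contains occ c))

def pvBestLoop (sx sy : Int) (cands : List ((Int × Int) × String)) : Option ((Int × Int) × String × Int) :=
  cands.foldl
    (fun best pd =>
      let dist := |pd.1.1 - sx| + |pd.1.2 - sy|
      match best with
      | none => some (pd.1, pd.2, dist)
      | some b => if dist < b.2.2 then some (pd.1, pd.2, dist) else best)
    none

def get_spore_position_alt (protein_pos : Int × Int) (occupied_positions : List (Int × Int)) (sporer_pos : Int × Int) (width : Int) (height : Int) : (Option (Int × Int)) × Option String :=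
  let px := protein_pos.1; let py := protein_pos.2
  let sx := sporer_pos.1; let sy := sporer_pos.2
  let occ := PySem.Set.ofList occupied_positions
  let dx := |sx - px|
  let dy := |sy - py|
  let candsNS : List ((Int × Int) × String) :=
    if dx ≤ 2 then
      let r := 2 - dx
      (((if 0 < r then [py + r, py - r] else [py]).filter
          (fun y => decide (0 ≤ y) && decide (y < sy) &&
            pvPathFree occ ((PySem.List.pyRange y sy 1).map (fun t => (sx, t))))).map
        (fun y => ((sx, y), "N"))) ++
      (((if 0 < r then [py - r, py + r] else [py]).filter
          (fun y => decide (sy < y) && decide (y < height) &&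
            pvPathFree occ ((PySem.List.pyRange (sy+1) (y+1) 1).map (fun t => (sx, t))))).map
        (fun y => ((sx, y), "S")))
    else []
  let candsEW : List ((Int × Int) × String) :=
    if dy ≤ 2 then
      let r := 2 - dy
      (((if 0 < r then [px - r, px + r] else [px]).filter
          (fun x => decide (sx < x) && decide (x < width) &&
            pvPathFree occ ((PySem.List.pyRange (sx+1) (x+1) 1).map (fun t => (t, sy))))).map
        (fun x => ((x, sy), "E"))) ++
      (((if 0 < r then [px + r, px - r] else [px]).filter
          (fun x => decide (0 ≤ x) && decide (x < sx) &&
            pvPathFree occ ((PySem.List.pyRange x sx 1).map (fun t => (t, sy))))).map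
        (fun x => ((x, sy), "W")))
    else []
  match pvBestLoop sx sy (candsNS ++ candsEW) with
  | none => (none, none)
  | some b => (some b.1, some b.2.1)

-- ===== PRECONDITION & SPEC =====
def Spec_get_spore_position (protein_pos : Int × Int) (occupied_positions : List (Int × Int)) (sporer_pos : Int × Int) (width : Int) (height : Int) (out : (Option (Int × Int)) × Option String) : Prop := out = get_spore_position_alt protein_pos occupied_positions sporer_pos width height
instance (protein_pos : Int × Int) (occupied_positions : List (Int × Int)) (sporer_pos : Int × Int) (width : Int) (height : Int) (out : (Option (Int × Int)) × Option String) : Decidable (Spec_get_spore_position protein_pos occupied_positions sporer_pos width height out) := by unfold Spec_get_spore_position; infer_instance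

-- ===== CLAIM (what is proved, stated in full; the proofs are below) =====
def Claim_equal_get_spore_position : Prop := ∀ (protein_pos : Int × Int) (occupied_positions : List (Int × Int)) (sporer_pos : Int × Int) (width : Int) (height : Int), Dom_get_spore_position protein_pos occupied_positions sporer_pos width height → Spec_get_spore_position protein_pos occupied_positions sporer_pos width height (get_spore_position protein_pos occupied_positions sporer_pos width height)

-- ===== LEMMAS AND PROOFS =====

lemma pvF (p p' : Int → Bool) (aa : Int) :
    ∀ (ys : List Int), ys.Pairwise (· < ·) →
    (∀ y ∈ ys, y ≠ aa → p y = p' y) →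
    (∀ y ∈ ys, y < aa → p y = false) →
    p aa = true → p' aa = false →
    ys.filter p = (if aa ∈ ys then [aa] else []) ++ ys.filter p'
  | [], _, _, _, _, _ => by simp
  | y :: t, hpw, h1, h2, h3, h4 => by
    rcases List.pairwise_cons.mp hpw with ⟨hlt, hpt⟩
    by_cases hy : y = aa
    · subst hy
      have ht : t.filter p = t.filter p' := by
        apply List.filter_congr
        intro z hz
        exact h1 z (List.mem_cons_of_mem _ hz) (by have := hlt z hz; omega)
      simp [h3, h4, ht]
    · by_cases hlty : y < aa
      · have hp : p y = false := h2 y List.mem_cons_self hlty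
        have hp' : p' y = false := by rw [← h1 y List.mem_cons_self hy]; exact hp
        have := pvF p p' aa t hpt (fun z hz => h1 z (List.mem_cons_of_mem _ hz))
          (fun z hz => h2 z (List.mem_cons_of_mem _ hz)) h3 h4
        simp [hp, hp', this, List.mem_cons, Ne.symm hy]
      · -- aa < y, hence aa not in y :: t
        have hna : aa ∉ y :: t := by
          intro hmem
          rcases List.mem_cons.mp hmem with h | h
          · exact hy h.symm
          · have := hlt aa h; omega
        have : (y :: t).filter p = (y :: t).filter p' := by
          apply List.filter_congr
          intro z hz
          apply h1 z hz
          intro hzz; exact hna (hzz ▸ hz)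
        simp [hna, this]

lemma pvAllRange (f : Int → Bool) (a b : Int) :
    (PySem.List.pyRange a b 1).all f = true ↔ ∀ t, a ≤ t → t < b → f t = true := by
  simp only [List.all_eq_true, PySem.List.mem_pyRange_one]
  exact ⟨fun h t h1 h2 => h t ⟨h1, h2⟩, fun h t ⟨h1, h2⟩ => h t h1 h2⟩

lemma pvG (f q : Int → Bool) (ys : List Int) (b : Int)
    (hchar : ∀ t, q t = true ↔ t ∈ ys) (hys : ys.Pairwise (· < ·)) :
    ∀ (n : Nat) (a : Int), (b - a).toNat ≤ n →
    ((PySem.List.pyRange a b 1).takeWhile f).filter q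
      = ys.filter (fun y => decide (a ≤ y) && decide (y < b) && (PySem.List.pyRange a (y+1) 1).all f) := by
  intro n
  induction n with
  | zero =>
    intro a hn
    have hba : b ≤ a := by omega
    rw [PySem.List.pyRange_one_eq_nil hba]
    simp only [List.takeWhile_nil, List.filter_nil]
    symm
    rw [List.filter_eq_nil_iff]
    intro y _
    simp only [Bool.and_eq_true, decide_eq_true_eq, not_and]
    rintro ⟨hy1, hy2⟩ _
    omega
  | succ n ih =>
    intro a hn
    by_cases hab : b ≤ a
    · rw [PySem.List.pyRange_one_eq_nil hab]
      simp only [List.takeWhile_nil, List.filter_nil]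
      symm
      rw [List.filter_eq_nil_iff]
      intro y _
      simp only [Bool.and_eq_true, decide_eq_true_eq, not_and]
      rintro ⟨hy1, hy2⟩ _
      omega
    · have hab' : a < b := by omega
      rw [PySem.List.pyRange_one_cons hab']
      rw [List.takeWhile_cons]
      by_cases hfa : f a = true
      · simp only [hfa, if_true]
        rw [List.filter_cons]
        have hIH := ih (a + 1) (by omega)
        -- pointwise relation between the a-predicate and the (a+1)-predicate
        have hpp' : ∀ y ∈ ys, y ≠ a →
            (decide (a ≤ y) && decide (y < b) && (PySem.List.pyRange a (y+1) 1).all f)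
            = (decide (a+1 ≤ y) && decide (y < b) && (PySem.List.pyRange (a+1) (y+1) 1).all f) := by
          intro y _ hne
          rcases lt_or_gt_of_ne hne with hlt | hgt
          · rw [decide_eq_false (show ¬ a ≤ y by omega), decide_eq_false (show ¬ a+1 ≤ y by omega)]
            simp
          · rw [PySem.List.pyRange_one_cons (show a < y + 1 by omega)]
            rw [decide_eq_true (show a ≤ y by omega), decide_eq_true (show a+1 ≤ y by omega)]
            simp [hfa]
        by_cases hqa : q a = true
        · have haas : a ∈ ys := (hchar a).mp hqa
          have key := pvF _ _ a ys hys hpp'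
            (fun y _ hy => by
              rw [decide_eq_false (show ¬ a ≤ y by omega)]; simp)
            (by
              rw [decide_eq_true (le_refl a), decide_eq_true hab']
              have : PySem.List.pyRange a (a+1) 1 = [a] := PySem.List.pyRange_one_singleton a
              simp [this, hfa])
            (by rw [decide_eq_false (show ¬ a + 1 ≤ a by omega)]; simp)
          simp only [hqa, key, hIH, if_pos haas]
          simp
        · have haas : a ∉ ys := fun h => hqa ((hchar a).mpr h)
          have key : ys.filter (fun y => decide (a ≤ y) && decide (y < b) && (PySem.List.pyRange a (y+1) 1).all f)
              = ys.filter (fun y => decide (a+1 ≤ y) && decide (y < b) && (PySem.List.pyRange (a+1) (y+1) 1).all f) := by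
            apply List.filter_congr
            intro y hy
            exact hpp' y hy (fun hya => haas (hya ▸ hy))
          simp only [eq_false_of_ne_true hqa, Bool.false_eq_true, if_false, key, hIH]
      · simp only [eq_false_of_ne_true hfa, Bool.false_eq_true, if_false, List.filter_nil]
        symm
        rw [List.filter_eq_nil_iff]
        intro y _
        simp only [Bool.and_eq_true, decide_eq_true_eq, not_and]
        rintro ⟨hy1, hy2⟩ hall
        have := (pvAllRange f a (y+1)).mp hall a (le_refl a) (by omega)
        exact hfa this

def pvFree (occL : List (Int × Int)) (p : Int × Int) : Bool := !(occL.contains p)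
def pvQ2 (px py : Int) (p : Int × Int) : Bool := decide (|p.1 - px| + |p.2 - py| = 2)
def pvUpd (sx sy : Int) (st : Option String × Option (Int × Int) × Option Int) (pd : (Int × Int) × String) : Option String × Option (Int × Int) × Option Int :=
  if pvLtInf (|pd.1.1 - sx| + |pd.1.2 - sy|) st.2.2 then (some pd.2, some pd.1, some (|pd.1.1 - sx| + |pd.1.2 - sy|)) else st
def pvConv : Option ((Int × Int) × String × Int) → Option String × Option (Int × Int) × Option Int
  | none => (none, none, none)
  | some b => (some b.2.1, some b.1, some b.2.2)

lemma pvScanA_eq (px py sx sy : Int) (occL : List (Int × Int)) (dir : String) :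
    ∀ (cells : List (Int × Int)) (st : Option String × Option (Int × Int) × Option Int),
    pvScanA px py sx sy occL dir cells st
      = ((cells.takeWhile (pvFree occL)).filter (pvQ2 px py)).foldl (fun st pos => pvUpd sx sy st (pos, dir)) st
  | [], st => by simp [pvScanA]
  | pos :: rest, st => by
    rw [pvScanA]
    by_cases hc : occL.contains pos
    · have hm : pos ∈ occL := by simpa using hc
      simp [pvFree, hm]
    · have hm : pos ∉ occL := by simpa using hc
      rw [List.takeWhile_cons]
      simp only [pvFree, hc, Bool.not_false, if_true, hm]
      rw [List.filter_cons]
      by_cases hq : |pos.1 - px| + |pos.2 - py| = 2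
      · simp only [pvQ2, decide_eq_true hq, if_pos hq]
        rw [pvScanA_eq px py sx sy occL dir rest]
        simp [pvUpd]
      · simp only [pvQ2, decide_eq_false hq, if_neg hq]
        rw [pvScanA_eq px py sx sy occL dir rest]
        simp

lemma pvSim (sx sy : Int) :
    ∀ (l : List ((Int × Int) × String)) (ob : Option ((Int × Int) × String × Int)),
    l.foldl (pvUpd sx sy) (pvConv ob)
      = pvConv (l.foldl
          (fun best pd =>
            let dist := |pd.1.1 - sx| + |pd.1.2 - sy|
            match best with
            | none => some (pd.1, pd.2, dist)
            | some b => if dist < b.2.2 then some (pd.1, pd.2, dist) else best)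
          ob)
  | [], ob => by simp
  | pd :: rest, ob => by
    rw [List.foldl_cons, List.foldl_cons]
    have hstep : pvUpd sx sy (pvConv ob) pd
        = pvConv (match ob with
            | none => some (pd.1, pd.2, |pd.1.1 - sx| + |pd.1.2 - sy|)
            | some b => if |pd.1.1 - sx| + |pd.1.2 - sy| < b.2.2 then some (pd.1, pd.2, |pd.1.1 - sx| + |pd.1.2 - sy|) else some b) := by
      cases ob with
      | none => simp [pvUpd, pvConv, pvLtInf]
      | some b =>
        simp only [pvUpd, pvConv, pvLtInf]
        by_cases h1 : |pd.1.1 - sx| + |pd.1.2 - sy| < b.2.2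
        · rw [if_pos (by simpa using h1), if_pos h1]
        · rw [if_neg (by simpa using h1), if_neg h1]
    rw [hstep]
    cases ob with
    | none => exact pvSim sx sy rest _
    | some b =>
      by_cases h1 : |pd.1.1 - sx| + |pd.1.2 - sy| < b.2.2
      · simp only [if_pos h1]
        exact pvSim sx sy rest _
      · simp only [if_neg h1]
        exact pvSim sx sy rest _

lemma pvPathFree_ofList (occL : List (Int × Int)) (cells : List (Int × Int)) :
    pvPathFree (PySem.Set.ofList occL) cells = cells.all (pvFree occL) := by
  unfold pvPathFree pvFree
  refine List.all_congr rfl fun c => ?_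
  have : PySem.Set.contains (PySem.Set.ofList occL) c = occL.contains c := by
    simp [PySem.Set.contains, PySem.Set.mem_ofList]
  rw [this]

lemma pvNegRange (a b : Int) :
    PySem.List.pyRange a b (-1) = (PySem.List.pyRange (-a) (-b) 1).map (fun z => -z) := by
  rw [PySem.List.pyRange_neg_one, PySem.List.pyRange_one]
  have h : -b - -a = a - b := by ring
  rw [h, List.map_map]
  apply List.map_congr_left
  intro k _
  simp [Function.comp]
  ring

lemma pvAllNeg (g : Int → Bool) (a b : Int) :
    (PySem.List.pyRange a b 1).all (fun z => g (-z)) = (PySem.List.pyRange (1-b) (1-a) 1).all g := by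
  by_cases h : (PySem.List.pyRange (1-b) (1-a) 1).all g = true
  · rw [h, pvAllRange]
    intro t h1 h2
    exact (pvAllRange g (1-b) (1-a)).mp h (-t) (by omega) (by omega)
  · have h2 : (PySem.List.pyRange (1-b) (1-a) 1).all g = false := Bool.eq_false_iff.mpr h
    have h3 := h2
    rw [List.all_eq_false] at h3
    rcases h3 with ⟨t, ht, hgt⟩
    rw [h2, List.all_eq_false]
    rw [PySem.List.mem_pyRange_one] at ht
    refine ⟨-t, ?_, ?_⟩
    · rw [PySem.List.mem_pyRange_one]; omega
    · simpa using hgt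

lemma pvQ2nilCol (px py sx : Int) (hd : ¬ |sx - px| ≤ 2) (cells : List (Int × Int))
    (h : ∀ p ∈ cells, p.1 = sx) : cells.filter (pvQ2 px py) = [] := by
  rw [List.filter_eq_nil_iff]
  intro p hp
  have h1 := h p hp
  simp only [pvQ2, h1, decide_eq_true_eq]
  have h0 : 0 ≤ |p.2 - py| := abs_nonneg _
  have h2 : 0 ≤ |sx - px| := abs_nonneg _
  omega

lemma pvQ2nilRow (px py sy : Int) (hd : ¬ |sy - py| ≤ 2) (cells : List (Int × Int))
    (h : ∀ p ∈ cells, p.2 = sy) : cells.filter (pvQ2 px py) = [] := by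
  rw [List.filter_eq_nil_iff]
  intro p hp
  have h1 := h p hp
  simp only [pvQ2, h1, decide_eq_true_eq]
  have h0 : 0 ≤ |p.1 - px| := abs_nonneg _
  have h2 : 0 ≤ |sy - py| := abs_nonneg _
  omega

lemma pvDirS (px py sx sy height : Int) (occL : List (Int × Int)) (hd : |sx - px| ≤ 2) :
    (((PySem.List.pyRange (sy+1) height 1).map (fun y => ((sx : Int), y))).takeWhile (pvFree occL)).filter (pvQ2 px py)
    = ((if 0 < 2 - |sx - px| then [py - (2 - |sx - px|), py + (2 - |sx - px|)] else [py]).filter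
        (fun y => decide (sy < y) && decide (y < height) &&
          pvPathFree (PySem.Set.ofList occL) ((PySem.List.pyRange (sy+1) (y+1) 1).map (fun t => (sx, t))))).map
        (fun y => ((sx : Int), y)) := by
  rw [List.takeWhile_map, List.filter_map]
  congr 1
  rw [pvG ((pvFree occL) ∘ (fun y => ((sx : Int), y))) ((pvQ2 px py) ∘ (fun y => ((sx : Int), y)))
      (if 0 < 2 - |sx - px| then [py - (2 - |sx - px|), py + (2 - |sx - px|)] else [py]) height
      ?hchar ?hpw ((height - (sy+1)).toNat) (sy+1) le_rfl]
  case hchar =>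
    intro t
    simp only [Function.comp, pvQ2, decide_eq_true_eq]
    have h0 : 0 ≤ |sx - px| := abs_nonneg _
    rcases abs_cases (t - py) with ⟨h3, _⟩ | ⟨h3, _⟩ <;> rw [h3] <;>
      generalize hX : |sx - px| = X at * <;> split_ifs <;> simp [List.mem_cons] <;> omega
  case hpw =>
    have h0 : 0 ≤ |sx - px| := abs_nonneg _
    generalize hX : |sx - px| = X at *
    split_ifs <;> simp <;> omega
  · apply List.filter_congr
    intro y _
    have e1 : decide (sy + 1 ≤ y) = decide (sy < y) := decide_eq_decide.mpr (by omega)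
    rw [pvPathFree_ofList, List.all_map, e1]

lemma pvDirE (px py sx sy width : Int) (occL : List (Int × Int)) (hd : |sy - py| ≤ 2) :
    (((PySem.List.pyRange (sx+1) width 1).map (fun x => (x, (sy : Int)))).takeWhile (pvFree occL)).filter (pvQ2 px py)
    = ((if 0 < 2 - |sy - py| then [px - (2 - |sy - py|), px + (2 - |sy - py|)] else [px]).filter
        (fun x => decide (sx < x) && decide (x < width) &&
          pvPathFree (PySem.Set.ofList occL) ((PySem.List.pyRange (sx+1) (x+1) 1).map (fun t => (t, sy))))).map
        (fun x => (x, (sy : Int))) := by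
  rw [List.takeWhile_map, List.filter_map]
  congr 1
  rw [pvG ((pvFree occL) ∘ (fun x => (x, (sy : Int)))) ((pvQ2 px py) ∘ (fun x => (x, (sy : Int))))
      (if 0 < 2 - |sy - py| then [px - (2 - |sy - py|), px + (2 - |sy - py|)] else [px]) width
      ?hchar ?hpw ((width - (sx+1)).toNat) (sx+1) le_rfl]
  case hchar =>
    intro t
    simp only [Function.comp, pvQ2, decide_eq_true_eq]
    have h0 : 0 ≤ |sy - py| := abs_nonneg _
    rcases abs_cases (t - px) with ⟨h3, _⟩ | ⟨h3, _⟩ <;> rw [h3] <;>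
      generalize hX : |sy - py| = X at * <;> split_ifs <;> simp [List.mem_cons] <;> omega
  case hpw =>
    have h0 : 0 ≤ |sy - py| := abs_nonneg _
    generalize hX : |sy - py| = X at *
    split_ifs <;> simp <;> omega
  · apply List.filter_congr
    intro x _
    have e1 : decide (sx + 1 ≤ x) = decide (sx < x) := decide_eq_decide.mpr (by omega)
    rw [pvPathFree_ofList, List.all_map, e1]

lemma pvDirN (px py sx sy : Int) (occL : List (Int × Int)) (hd : |sx - px| ≤ 2) :
    (((PySem.List.pyRange (sy-1) (-1) (-1)).map (fun y => ((sx : Int), y))).takeWhile (pvFree occL)).filter (pvQ2 px py)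
    = ((if 0 < 2 - |sx - px| then [py + (2 - |sx - px|), py - (2 - |sx - px|)] else [py]).filter
        (fun y => decide (0 ≤ y) && decide (y < sy) &&
          pvPathFree (PySem.Set.ofList occL) ((PySem.List.pyRange y sy 1).map (fun t => (sx, t))))).map
        (fun y => ((sx : Int), y)) := by
  have e1 : -(sy - 1) = 1 - sy := by ring
  have e2 : -(-1 : Int) = (1 : Int) := by norm_num
  rw [pvNegRange, e1, e2, List.map_map]
  have hcomp : ((fun y => ((sx : Int), y)) ∘ (fun z : Int => -z)) = fun z : Int => ((sx : Int), -z) := rfl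
  rw [hcomp, List.takeWhile_map, List.filter_map]
  rw [pvG ((pvFree occL) ∘ (fun z : Int => ((sx : Int), -z))) ((pvQ2 px py) ∘ (fun z : Int => ((sx : Int), -z)))
      (if 0 < 2 - |sx - px| then [-(py + (2 - |sx - px|)), -(py - (2 - |sx - px|))] else [-py]) 1
      ?hchar ?hpw ((1 - (1 - sy)).toNat) (1 - sy) le_rfl]
  case hchar =>
    intro t
    simp only [Function.comp, pvQ2, decide_eq_true_eq]
    have h0 : 0 ≤ |sx - px| := abs_nonneg _
    rcases abs_cases (-t - py) with ⟨h3, _⟩ | ⟨h3, _⟩ <;> rw [h3] <;>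
      generalize hX : |sx - px| = X at * <;> split_ifs <;> simp [List.mem_cons] <;> omega
  case hpw =>
    have h0 : 0 ≤ |sx - px| := abs_nonneg _
    generalize hX : |sx - px| = X at *
    split_ifs <;> simp <;> omega
  · have hyy : (if 0 < 2 - |sx - px| then [py + (2 - |sx - px|), py - (2 - |sx - px|)] else [py])
        = (if 0 < 2 - |sx - px| then [-(py + (2 - |sx - px|)), -(py - (2 - |sx - px|))] else [-py]).map (fun z : Int => -z) := by
      split_ifs <;> simp
    rw [hyy, List.filter_map, List.map_map]
    congr 1
    apply List.filter_congr
    intro z _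
    simp only [Function.comp_apply]
    rw [pvPathFree_ofList, List.all_map]
    have ea : ((PySem.List.pyRange (1 - sy) (z + 1) 1).all ((pvFree occL) ∘ (fun z : Int => ((sx : Int), -z))))
        = (PySem.List.pyRange (-z) sy 1).all (fun t => pvFree occL ((sx : Int), t)) := by
      have := pvAllNeg (fun t => pvFree occL ((sx : Int), t)) (1 - sy) (z + 1)
      have e3 : (1 : Int) - (z + 1) = -z := by ring
      have e4 : (1 : Int) - (1 - sy) = sy := by ring
      rw [e3, e4] at this
      exact this
    rw [ea]
    have eb : decide (1 - sy ≤ z) = decide (-z < sy) := decide_eq_decide.mpr (by omega)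
    have ec : decide (z < 1) = decide (0 ≤ -z) := decide_eq_decide.mpr (by omega)
    rw [eb, ec]
    cases hb1 : decide (0 ≤ -z) <;> cases hb2 : decide (-z < sy) <;> simp <;> try rfl

lemma pvDirW (px py sx sy : Int) (occL : List (Int × Int)) (hd : |sy - py| ≤ 2) :
    (((PySem.List.pyRange (sx-1) (-1) (-1)).map (fun x => (x, (sy : Int)))).takeWhile (pvFree occL)).filter (pvQ2 px py)
    = ((if 0 < 2 - |sy - py| then [px + (2 - |sy - py|), px - (2 - |sy - py|)] else [px]).filter
        (fun x => decide (0 ≤ x) && decide (x < sx) &&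
          pvPathFree (PySem.Set.ofList occL) ((PySem.List.pyRange x sx 1).map (fun t => (t, sy))))).map
        (fun x => (x, (sy : Int))) := by
  have e1 : -(sx - 1) = 1 - sx := by ring
  have e2 : -(-1 : Int) = (1 : Int) := by norm_num
  rw [pvNegRange, e1, e2, List.map_map]
  have hcomp : ((fun x => (x, (sy : Int))) ∘ (fun z : Int => -z)) = fun z : Int => (-z, (sy : Int)) := rfl
  rw [hcomp, List.takeWhile_map, List.filter_map]
  rw [pvG ((pvFree occL) ∘ (fun z : Int => (-z, (sy : Int)))) ((pvQ2 px py) ∘ (fun z : Int => (-z, (sy : Int))))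
      (if 0 < 2 - |sy - py| then [-(px + (2 - |sy - py|)), -(px - (2 - |sy - py|))] else [-px]) 1
      ?hchar ?hpw ((1 - (1 - sx)).toNat) (1 - sx) le_rfl]
  case hchar =>
    intro t
    simp only [Function.comp, pvQ2, decide_eq_true_eq]
    have h0 : 0 ≤ |sy - py| := abs_nonneg _
    rcases abs_cases (-t - px) with ⟨h3, _⟩ | ⟨h3, _⟩ <;> rw [h3] <;>
      generalize hX : |sy - py| = X at * <;> split_ifs <;> simp [List.mem_cons] <;> omega
  case hpw =>
    have h0 : 0 ≤ |sy - py| := abs_nonneg _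
    generalize hX : |sy - py| = X at *
    split_ifs <;> simp <;> omega
  · have hyy : (if 0 < 2 - |sy - py| then [px + (2 - |sy - py|), px - (2 - |sy - py|)] else [px])
        = (if 0 < 2 - |sy - py| then [-(px + (2 - |sy - py|)), -(px - (2 - |sy - py|))] else [-px]).map (fun z : Int => -z) := by
      split_ifs <;> simp
    rw [hyy, List.filter_map, List.map_map]
    congr 1
    apply List.filter_congr
    intro z _
    simp only [Function.comp_apply]
    rw [pvPathFree_ofList, List.all_map]
    have ea : ((PySem.List.pyRange (1 - sx) (z + 1) 1).all ((pvFree occL) ∘ (fun z : Int => (-z, (sy : Int)))))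
        = (PySem.List.pyRange (-z) sx 1).all (fun t => pvFree occL (t, (sy : Int))) := by
      have := pvAllNeg (fun t => pvFree occL (t, (sy : Int))) (1 - sx) (z + 1)
      have e3 : (1 : Int) - (z + 1) = -z := by ring
      have e4 : (1 : Int) - (1 - sx) = sx := by ring
      rw [e3, e4] at this
      exact this
    rw [ea]
    have eb : decide (1 - sx ≤ z) = decide (-z < sx) := decide_eq_decide.mpr (by omega)
    have ec : decide (z < 1) = decide (0 ≤ -z) := decide_eq_decide.mpr (by omega)
    rw [eb, ec]
    cases hb1 : decide (0 ≤ -z) <;> cases hb2 : decide (-z < sx) <;> simp <;> try rfl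

lemma pvFinal (sx sy : Int) (l : List ((Int × Int) × String)) :
    (((l.foldl (pvUpd sx sy) (none, none, none)).2.1 : Option (Int × Int)),
      ((l.foldl (pvUpd sx sy) (none, none, none)).1 : Option String))
    = (match pvBestLoop sx sy l with
       | none => (none, none)
       | some b => (some b.1, some b.2.1)) := by
  have h := pvSim sx sy l none
  rw [show ((none, none, none) : Option String × Option (Int × Int) × Option Int) = pvConv none from rfl, h]
  unfold pvBestLoop
  cases hR : List.foldl
      (fun best pd =>
        let dist := |pd.1.1 - sx| + |pd.1.2 - sy|
        match best with
        | none => some (pd.1, pd.2, dist)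
        | some b => if dist < b.2.2 then some (pd.1, pd.2, dist) else best)
      none l with
  | none => rfl
  | some b => rfl

lemma pvTag (sx sy : Int) (dir : String) (K : List (Int × Int)) (st : Option String × Option (Int × Int) × Option Int) :
    K.foldl (fun st pos => pvUpd sx sy st (pos, dir)) st = (K.map (fun pos => (pos, dir))).foldl (pvUpd sx sy) st :=
  (List.foldl_map ..).symm

lemma pvColFst (sx : Int) (ray : List Int) (occL : List (Int × Int)) :
    ∀ p ∈ (ray.map (fun y => ((sx : Int), y))).takeWhile (pvFree occL), p.1 = sx := by
  intro p hp
  have h := List.takeWhile_subset _ hp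
  rcases List.mem_map.mp h with ⟨y, _, rfl⟩
  rfl

lemma pvRowSnd (sy : Int) (ray : List Int) (occL : List (Int × Int)) :
    ∀ p ∈ (ray.map (fun x => (x, (sy : Int)))).takeWhile (pvFree occL), p.2 = sy := by
  intro p hp
  have h := List.takeWhile_subset _ hp
  rcases List.mem_map.mp h with ⟨x, _, rfl⟩
  rfl

theorem pvMain (protein_pos : Int × Int) (occupied_positions : List (Int × Int)) (sporer_pos : Int × Int) (width height : Int) :
    get_spore_position protein_pos occupied_positions sporer_pos width height
      = get_spore_position_alt protein_pos occupied_positions sporer_pos width height := by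
  obtain ⟨px, py⟩ := protein_pos
  obtain ⟨sx, sy⟩ := sporer_pos
  simp only [get_spore_position, get_spore_position_alt, List.foldl_cons, List.foldl_nil]
  rw [pvScanA_eq, pvScanA_eq, pvScanA_eq, pvScanA_eq]
  rw [pvTag, pvTag, pvTag, pvTag]
  rw [← List.foldl_append, ← List.foldl_append, ← List.foldl_append]
  rw [pvFinal]
  refine congrArg (fun L => match pvBestLoop sx sy L with
    | none => ((none : Option (Int × Int)), (none : Option String))
    | some b => (some b.1, some b.2.1)) ?_
  by_cases hdx : |sx - px| ≤ 2 <;> by_cases hdy : |sy - py| ≤ 2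
  · rw [pvDirN px py sx sy occupied_positions hdx, pvDirS px py sx sy height occupied_positions hdx,
      pvDirE px py sx sy width occupied_positions hdy, pvDirW px py sx sy occupied_positions hdy,
      if_pos hdx, if_pos hdy]
    simp only [List.map_map, Function.comp_def, List.append_assoc, List.map_nil, List.nil_append, List.append_nil]
    try rfl
  · rw [pvDirN px py sx sy occupied_positions hdx, pvDirS px py sx sy height occupied_positions hdx,
      pvQ2nilRow px py sy hdy _ (pvRowSnd sy _ occupied_positions),
      pvQ2nilRow px py sy hdy _ (pvRowSnd sy _ occupied_positions),
      if_pos hdx, if_neg hdy]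
    simp only [List.map_map, Function.comp_def, List.append_assoc, List.map_nil, List.nil_append, List.append_nil]
    try rfl
  · rw [pvQ2nilCol px py sx hdx _ (pvColFst sx _ occupied_positions),
      pvQ2nilCol px py sx hdx _ (pvColFst sx _ occupied_positions),
      pvDirE px py sx sy width occupied_positions hdy, pvDirW px py sx sy occupied_positions hdy,
      if_neg hdx, if_pos hdy]
    simp only [List.map_map, Function.comp_def, List.append_assoc, List.map_nil, List.nil_append, List.append_nil]
    try rfl
  · rw [pvQ2nilCol px py sx hdx _ (pvColFst sx _ occupied_positions),
      pvQ2nilCol px py sx hdx _ (pvColFst sx _ occupied_positions),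
      pvQ2nilRow px py sy hdy _ (pvRowSnd sy _ occupied_positions),
      pvQ2nilRow px py sy hdy _ (pvRowSnd sy _ occupied_positions),
      if_neg hdx, if_neg hdy]
    simp

-- ===== VERDICT (by name: the statement is the Claim_ definition above) =====
theorem get_spore_position_spec : Claim_equal_get_spore_position := by
  intro protein_pos occupied_positions sporer_pos width height _
  unfold Spec_get_spore_position
  exact pvMain protein_pos occupied_positions sporer_pos width height
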